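-- pv_equiv track=rewrite | github.com/minarth/advent-of-code | 2015/14/14.py | part_two
-- ===== SOURCE A (Python) =====
-- def part_two(stats, time):
--     """
--     >>> part_two([("Comet", 14, 10, 127), ("Dancer", 16, 11, 162)], 1)
--     {'Comet': 0, 'Dancer': 1}
--
--     >>> part_two([("Comet", 14, 10, 127), ("Dancer", 16, 11, 162)], 1000)
--     {'Comet': 312, 'Dancer': 689}
--     """
--
--     distances = {}
--     points = {}
--     for name, speed, tt, rt in stats:
--         points[name] = [0]*time
--         status = ([speed]*tt + [0]*rt)*((time // (tt+rt))+1)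
--
--         # Create cummulative distances
--         for t in range(time):
--             if t == 0:
--                 distances[name] = [status[t]]
--             else:
--                 distances[name].append(distances[name][-1] + status[t])
--
--     for t in range(time):
--         max_val = 0
--         for name, _, _, _ in stats:
--             max_val = max(distances[name][t], max_val)
--
--         for name, _, _, _ in stats:
--             if distances[name][t] == max_val:
--                 points[name][t] = 1
--
--     return {k: sum(v) for k,v in points.items()}
-- ===== SOURCE B (Python) =====
-- def _dist_at(speed, tt, rt, s):
--     # closed-form distance travelled after s whole seconds
--     q, r = divmod(s, tt + rt)
--     return speed * (q * tt + min(tt, r))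
--
--
-- def part_two(stats, time):
--     ent = {}
--     for name, speed, tt, rt in stats:
--         ent[name] = (speed, tt, rt)
--     pts = {name: 0 for name in ent}
--     for s in range(1, time + 1):
--         dists = [(name, _dist_at(sp, tt, rt, s)) for name, (sp, tt, rt) in ent.items()]
--         best = 0
--         for _, d in dists:
--             best = max(best, d)
--         for name, d in dists:
--             if d == best:
--                 pts[name] += 1
--     return pts
-- ===== Notes on version B (the rewrite author's own statement) =====
-- stated objective: alternative
-- what changed: B replaces A's materialised per-reindeer status and cumulative-distance arrays with a closed-form piecewise-linear distance formula evaluated per second (divmod over the fly/rest period), keeping O(1) memory per reindeer instead of O(time) arrays.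
-- outside the precondition, e.g. on part_two([('a', 1, -1, 3)], 2): A returns {'a': 2}, B returns {'a': 0}
import Mathlib
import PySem

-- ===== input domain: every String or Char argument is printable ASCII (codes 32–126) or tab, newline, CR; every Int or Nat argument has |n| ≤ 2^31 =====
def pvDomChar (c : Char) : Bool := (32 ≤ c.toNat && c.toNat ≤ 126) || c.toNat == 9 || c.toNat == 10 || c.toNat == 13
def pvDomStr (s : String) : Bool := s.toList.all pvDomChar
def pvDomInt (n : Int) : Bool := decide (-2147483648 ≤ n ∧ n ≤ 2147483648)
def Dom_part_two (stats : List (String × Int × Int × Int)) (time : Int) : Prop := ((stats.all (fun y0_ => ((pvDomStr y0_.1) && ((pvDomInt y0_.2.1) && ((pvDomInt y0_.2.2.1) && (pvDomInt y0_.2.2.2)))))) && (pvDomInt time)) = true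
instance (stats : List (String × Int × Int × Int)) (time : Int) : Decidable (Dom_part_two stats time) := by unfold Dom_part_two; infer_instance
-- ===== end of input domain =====

-- B replaces A's materialised status/cumulative-distance arrays by a closed-form per-second
-- distance formula (alternative algorithm, O(1) memory per reindeer); return values proved equal on Pre_.

-- ===== PORT A =====
-- helper naming A's local 'status' list: ([speed]*tt + [0]*rt) * (time // (tt+rt) + 1)
def statusOf (speed tt rt time : Int) : List Int :=
  PySem.List.pyRepeat (List.replicate tt.toNat speed ++ List.replicate rt.toNat (0 : Int))
    (PySem.Int.floordiv time (tt + rt) + 1)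

def part_two (stats : List (String × Int × Int × Int)) (time : Int) : List (String × Int) :=
  let dp : PySem.Dict String (List Int) × PySem.Dict String (List Int) :=
    stats.foldl (fun dp e =>
      let name := e.1; let speed := e.2.1; let tt := e.2.2.1; let rt := e.2.2.2
      let points := dp.2.insert name (List.replicate time.toNat (0 : Int))
      let status := statusOf speed tt rt time
      let distances := (PySem.List.pyRange 0 time 1).foldl (fun d t =>
        if t = 0 then d.insert name [PySem.List.pyGetD status t 0]
        else d.modify name [] (fun l => l ++ [PySem.List.pyGetD l (-1) 0 + PySem.List.pyGetD status t 0]))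
        dp.1
      (distances, points)) (PySem.Dict.empty, PySem.Dict.empty)
  let distances := dp.1
  let points := (PySem.List.pyRange 0 time 1).foldl (fun pts t =>
      let max_val := stats.foldl (fun m e => max (PySem.List.pyGetD (distances.getD e.1 []) t 0) m) 0
      stats.foldl (fun pts e =>
        if PySem.List.pyGetD (distances.getD e.1 []) t 0 = max_val
        then pts.modify e.1 [] (fun l => PySem.List.pySetD l t 1) else pts) pts) dp.2
  points.items.map (fun kv => (kv.1, kv.2.sum))

-- ===== PORT B =====
-- closed-form distance travelled after s whole seconds (Source B's _dist_at)
def dist_at (speed tt rt s : Int) : Int :=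
  let q := PySem.Int.floordiv s (tt + rt)
  let r := PySem.Int.mod s (tt + rt)
  speed * (q * tt + min tt r)

def part_two_alt (stats : List (String × Int × Int × Int)) (time : Int) : List (String × Int) :=
  let ent : PySem.Dict String (Int × Int × Int) :=
    stats.foldl (fun d e => d.insert e.1 e.2) PySem.Dict.empty
  let pts0 : PySem.Dict String Int :=
    ent.keys.foldl (fun d n => d.insert n (0 : Int)) PySem.Dict.empty
  let pts := (PySem.List.pyRange 1 (time + 1) 1).foldl (fun (pts : PySem.Dict String Int) s =>
      let dists : List (String × Int) := ent.items.map (fun kv => (kv.1, dist_at kv.2.1 kv.2.2.1 kv.2.2.2 s))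
      let best := dists.foldl (fun b p => max b p.2) 0
      dists.foldl (fun pts p => if p.2 = best then pts.modify p.1 0 (· + 1) else pts) pts) pts0
  pts.items

-- ===== PRECONDITION & SPEC =====
-- Pre_ excludes entries whose fly+rest period is 0 (A raises ZeroDivisionError) and, for positive
-- time, entries with a negative fly or rest duration, on which A usually raises IndexError and any
-- value it does return is an artefact of Python's negative list-repetition truncation.
def Pre_part_two (stats : List (String × Int × Int × Int)) (time : Int) : Prop :=
  ∀ e ∈ stats, e.2.2.1 + e.2.2.2 ≠ 0 ∧ (0 < time → 0 ≤ e.2.2.1 ∧ 0 ≤ e.2.2.2)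
instance (stats : List (String × Int × Int × Int)) (time : Int) : Decidable (Pre_part_two stats time) := by unfold Pre_part_two; infer_instance

def pvWitness_part_two : (List (String × Int × Int × Int)) × Int :=
  ([("Comet", 14, 10, 127), ("Dancer", 16, 11, 162)], 3)

def Spec_part_two (stats : List (String × Int × Int × Int)) (time : Int) (out : List (String × Int)) : Prop := out = part_two_alt stats time
instance (stats : List (String × Int × Int × Int)) (time : Int) (out : List (String × Int)) : Decidable (Spec_part_two stats time out) := by unfold Spec_part_two; infer_instance

-- ===== CLAIM (what is proved, stated in full; the proofs are below) =====
def Claim_equal_part_two : Prop := ∀ (stats : List (String × Int × Int × Int)) (time : Int), Dom_part_two stats time → Pre_part_two stats time → Spec_part_two stats time (part_two stats time)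

-- ===== LEMMAS AND PROOFS =====

-- Shared reference pieces ------------------------------------------------

def keysOf (stats : List (String × Int × Int × Int)) : List String :=
  PySem.Set.ofList (stats.map (·.1))

def entOf (stats : List (String × Int × Int × Int)) : PySem.Dict String (Int × Int × Int) :=
  stats.foldl (fun d e => d.insert e.1 e.2) PySem.Dict.empty

def valOf (stats : List (String × Int × Int × Int)) (n : String) : Int × Int × Int :=
  (entOf stats).getD n (0, 0, 0)

def dOf (stats : List (String × Int × Int × Int)) (n : String) (s : Int) : Int :=
  dist_at (valOf stats n).1 (valOf stats n).2.1 (valOf stats n).2.2 s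

def maxOf (stats : List (String × Int × Int × Int)) (s : Int) : Int :=
  ((keysOf stats).map (fun n => dOf stats n s)).foldl max 0

def leadOf (stats : List (String × Int × Int × Int)) (n : String) (k : Nat) : Bool :=
  decide (dOf stats n ((k : Int) + 1) = maxOf stats ((k : Int) + 1))

def refOut (stats : List (String × Int × Int × Int)) (time : Int) : List (String × Int) :=
  (keysOf stats).map (fun n => (n, ((List.range time.toNat).countP (leadOf stats n) : Int)))

theorem dist_at_zero (speed tt rt : Int) (htt : 0 ≤ tt) (hp : 0 < tt + rt) :
    dist_at speed tt rt 0 = 0 := by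
  simp only [dist_at]
  rw [PySem.Int.floordiv_eq_ediv_of_pos hp, PySem.Int.mod_eq_emod_of_pos hp]
  simp
  omega

theorem dist_at_step (speed tt rt s : Int) (htt : 0 ≤ tt) (hrt : 0 ≤ rt) (hp : 0 < tt + rt)
    (hs : 0 ≤ s) :
    dist_at speed tt rt (s + 1) =
      dist_at speed tt rt s + (if PySem.Int.mod s (tt + rt) < tt then speed else 0) := by
  simp only [dist_at]
  rw [PySem.Int.floordiv_eq_ediv_of_pos hp, PySem.Int.mod_eq_emod_of_pos hp,
      PySem.Int.floordiv_eq_ediv_of_pos hp, PySem.Int.mod_eq_emod_of_pos hp]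
  set p := tt + rt with hpdef
  have hr0 : 0 ≤ s % p := Int.emod_nonneg s (by omega)
  have hrlt : s % p < p := Int.emod_lt_of_pos s hp
  by_cases hc : s % p + 1 < p
  · have h1 : (s + 1) / p = s / p ∧ (s + 1) % p = s % p + 1 := by
      rw [Int.ediv_emod_unique hp]
      refine ⟨?_, by omega, by omega⟩
      have := Int.emod_add_ediv s p
      omega
    rw [h1.1, h1.2]
    by_cases hlt : s % p < tt
    · rw [if_pos hlt, show min tt (s % p) = s % p from by omega,
          show min tt (s % p + 1) = s % p + 1 from by omega]
      ring
    · rw [if_neg hlt, show min tt (s % p) = tt from by omega,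
          show min tt (s % p + 1) = tt from by omega]
      ring
  · have hre : s % p = p - 1 := by omega
    have h1 : (s + 1) / p = s / p + 1 ∧ (s + 1) % p = 0 := by
      rw [Int.ediv_emod_unique hp]
      refine ⟨?_, by omega, by omega⟩
      have := Int.emod_add_ediv s p
      have hx : p * (s / p + 1) = p * (s / p) + p := by ring
      omega
    rw [h1.1, h1.2]
    by_cases hlt : s % p < tt
    · have htp : tt = p := by omega
      rw [if_pos hlt, show min tt (s % p) = s % p from by omega,
          show min tt (0:Int) = 0 from by omega]
      linear_combination speed * htp - speed * hre
    · rw [if_neg hlt, show min tt (s % p) = tt from by omega,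
          show min tt (0:Int) = 0 from by omega]
      ring

theorem getD_flatten_replicate {α : Type} (xs : List α) (m i : Nat) (d : α)
    (h : i < m * xs.length) :
    ((List.replicate m xs).flatten).getD i d = xs.getD (i % xs.length) d := by
  induction m generalizing i with
  | zero => omega
  | succ k ih =>
    rw [List.replicate_succ, List.flatten_cons]
    by_cases hi : i < xs.length
    · rw [List.getD_append _ _ _ _ hi, Nat.mod_eq_of_lt hi]
    · have hlen : 0 < xs.length := by by_contra hl; simp at hl; simp [hl] at h
      have h2 : i - xs.length < k * xs.length := by
        have hsm : (k + 1) * xs.length = k * xs.length + xs.length := by ring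
        omega
      rw [List.getD_eq_getElem?_getD, List.getElem?_append_right (by omega),
          ← List.getD_eq_getElem?_getD, ih _ h2]
      congr 1
      conv_lhs => rw [show i - xs.length = i - xs.length * 1 by omega]
      rw [Nat.sub_mul_mod (x := i) (n := xs.length) (k := 1) (by omega)]

theorem status_get (speed tt rt time : Int) (htt : 0 ≤ tt) (hrt : 0 ≤ rt) (hp : 0 < tt + rt)
    (i : Nat) (hi : (i : Int) < time) :
    PySem.List.pyGetD (statusOf speed tt rt time) (i : Int) 0 =
      if PySem.Int.mod (i : Int) (tt + rt) < tt then speed else 0 := by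
  have htime : 0 < time := by omega
  set p := tt + rt with hpdef
  set P := List.replicate tt.toNat speed ++ List.replicate rt.toNat (0 : Int) with hP
  have hPlen : P.length = tt.toNat + rt.toNat := by
    rw [hP, List.length_append, List.length_replicate, List.length_replicate]
  set q1 := PySem.Int.floordiv time p + 1 with hq1
  have hq0 : 0 ≤ PySem.Int.floordiv time p := by
    rw [PySem.Int.floordiv_eq_ediv_of_pos hp]; positivity
  have hlt : (i : Int) < q1 * p := by
    have := (PySem.Int.floordiv_lt_iff_lt_mul (a := time) (b := p) (q := q1) hp).mp (by omega)
    omega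
  have h1 : ((q1.toNat : Nat) : Int) = q1 := Int.toNat_of_nonneg (by omega)
  have h2 : ((p.toNat : Nat) : Int) = p := Int.toNat_of_nonneg (by omega)
  have hcast : ((q1.toNat * p.toNat : Nat) : Int) = q1 * p := by push_cast [h1, h2]; ring
  have hbound : i < q1.toNat * P.length := by
    have hP2 : P.length = p.toNat := by omega
    rw [hP2]; omega
  rw [show statusOf speed tt rt time = ((List.replicate q1.toNat P).flatten) from rfl]
  rw [PySem.List.pyGetD_natCast, getD_flatten_replicate _ _ _ _ hbound]
  have hmod : PySem.Int.mod (i : Int) p = ((i % P.length : Nat) : Int) := by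
    rw [show P.length = p.toNat from by omega, PySem.Int.mod_eq_emod_of_pos hp]
    rw [show p = ((p.toNat : Nat) : Int) from h2.symm]
    push_cast
    rfl
  rw [hmod]
  have hmP : i % P.length < P.length := Nat.mod_lt i (by omega)
  by_cases hc : i % P.length < tt.toNat
  · have hlt2 : i % P.length < (List.replicate tt.toNat speed).length := by
      rw [List.length_replicate]; exact hc
    rw [if_pos (by omega), hP, List.getD_append _ _ _ _ hlt2]
    rw [List.getD_eq_getElem?_getD]
    simp [List.getElem?_replicate, hc]
  · have hge : (List.replicate tt.toNat speed).length ≤ i % P.length := by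
      rw [List.length_replicate]; exact Nat.le_of_not_lt hc
    rw [if_neg (by omega), hP, List.getD_eq_getElem?_getD,
        List.getElem?_append_right hge]
    have hlt3 : i % P.length - tt.toNat < rt.toNat := by omega
    simp [List.getElem?_replicate, hlt3]

theorem lastWins {ν : Type} (stats : List (String × Int × Int × Int))
    (step : PySem.Dict String ν → (String × Int × Int × Int) → PySem.Dict String ν)
    (F : (String × Int × Int × Int) → ν) (n : String)
    (h : ∀ d e, e ∈ stats → (step d e).get? n = if e.1 = n then some (F e) else d.get? n) :
    ∀ d : PySem.Dict String ν,
      (stats.foldl step d).get? n =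
        ((stats.reverse.find? (fun e => e.1 == n)).map F).or (d.get? n) := by
  induction stats with
  | nil => intro d; simp
  | cons e t ih =>
    intro d
    rw [List.foldl_cons, ih (fun d e he => h d e (List.mem_cons_of_mem _ he)),
        List.reverse_cons, List.find?_append]
    cases hf : t.reverse.find? (fun e => e.1 == n) with
    | some e' => simp [hf]
    | none =>
      simp only [hf, Option.none_or]
      rw [h d e (List.mem_cons_self)]
      by_cases he : e.1 = n
      · simp [he]
      · simp [he]

theorem cum_fold_aux (name : String) (st : List Int) (T : Nat) (D : Nat → Int)
    (hD0 : D 0 = 0) (hstep : ∀ i, i < T → PySem.List.pyGetD st (i : Int) 0 = D (i + 1) - D i) :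
    ∀ j, 1 ≤ j → j ≤ T → ∀ d : PySem.Dict String (List Int), ∀ m,
      ((List.range j).foldl (fun d (k : Nat) =>
          if (k : Int) = 0 then d.insert name [PySem.List.pyGetD st (k : Int) 0]
          else d.modify name [] (fun l => l ++ [PySem.List.pyGetD l (-1) 0 +
            PySem.List.pyGetD st (k : Int) 0])) d).get? m =
        if m = name then some ((List.range j).map (fun i => D (i + 1))) else d.get? m := by
  intro j
  induction j with
  | zero => omega
  | succ k ih =>
    intro _ hle d m
    by_cases hk : k = 0
    · subst hk
      rw [show List.range 1 = [0] from rfl, List.foldl_cons, List.foldl_nil,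
          if_pos (by norm_num)]
      rw [PySem.Dict.get?_insert, hstep 0 (by omega), hD0]
      norm_num
    · rw [List.range_succ, List.foldl_append, List.foldl_cons, List.foldl_nil]
      rw [if_neg (by exact_mod_cast hk)]
      have ihm := ih (by omega) (by omega) d
      show (PySem.Dict.insert _ name _).get? m = _
      rw [PySem.Dict.get?_insert]
      by_cases hm : m = name
      · rw [if_pos hm, if_pos hm]
        have hget : (List.foldl (fun (d : PySem.Dict String (List Int)) (k : Nat) =>
            if (k : Int) = 0 then d.insert name [PySem.List.pyGetD st (k : Int) 0]
            else d.modify name [] (fun l => l ++ [PySem.List.pyGetD l (-1) 0 +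
              PySem.List.pyGetD st (k : Int) 0])) d (List.range k)).getD name [] =
            (List.range k).map (fun i => D (i + 1)) := by
          apply PySem.Dict.getD_of_get?_eq_some
          rw [ihm name]; simp
        rw [hget]
        have hne : ((List.range k).map (fun i => D (i + 1))) ≠ [] := by
          simp [List.range_eq_nil]; omega
        beta_reduce
        rw [PySem.List.pyGetD_neg_one _ _ hne]
        have hlast : ((List.range k).map (fun i => D (i + 1))).getLast hne = D k := by
          rw [List.getLast_eq_getElem, List.getElem_map]
          congr 1
          simp
          omega
        rw [hlast, hstep k (by omega), List.map_append]
        simp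
      · rw [if_neg hm, if_neg hm, ihm m, if_neg hm]

def cumA (e : String × Int × Int × Int) (time : Int) : List Int :=
  (List.range time.toNat).map (fun i : Nat => dist_at e.2.1 e.2.2.1 e.2.2.2 ((i : Int) + 1))

theorem cum_fold_get (e : String × Int × Int × Int) (time : Int)
    (htt : 0 ≤ e.2.2.1) (hrt : 0 ≤ e.2.2.2) (hp : 0 < e.2.2.1 + e.2.2.2) (ht : 0 < time)
    (d : PySem.Dict String (List Int)) (m : String) :
    ((PySem.List.pyRange 0 time 1).foldl (fun d t =>
        if t = 0 then d.insert e.1 [PySem.List.pyGetD (statusOf e.2.1 e.2.2.1 e.2.2.2 time) t 0]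
        else d.modify e.1 [] (fun l => l ++ [PySem.List.pyGetD l (-1) 0 +
          PySem.List.pyGetD (statusOf e.2.1 e.2.2.1 e.2.2.2 time) t 0])) d).get? m =
      if m = e.1 then some (cumA e time) else d.get? m := by
  obtain ⟨name, speed, tt, rt⟩ := e
  simp only at htt hrt hp ⊢
  rw [show time = ((time.toNat : Nat) : Int) from (Int.toNat_of_nonneg (by omega)).symm,
      PySem.List.pyRange_zero_natCast, List.foldl_map]
  rw [Int.toNat_of_nonneg (by omega : (0:Int) ≤ time)]
  have hres := cum_fold_aux name (statusOf speed tt rt time) time.toNat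
      (fun i => dist_at speed tt rt (i : Int))
      (by simpa using dist_at_zero speed tt rt htt hp)
      (fun i hiT => by
        have h1 := status_get speed tt rt time htt hrt hp i (by omega)
        have h2 := dist_at_step speed tt rt (i : Int) htt hrt hp (by positivity)
        push_cast
        rw [h1]
        omega)
      time.toNat (by omega) le_rfl d m
  rw [hres]
  unfold cumA
  simp only
  by_cases hm : m = name
  · rw [if_pos hm, if_pos hm]
    congr 1
  · rw [if_neg hm, if_neg hm]


theorem foldl_max_eq_of_mem_iff (xs ys : List Int) (a : Int)
    (h : ∀ z, z ∈ xs ↔ z ∈ ys) : xs.foldl max a = ys.foldl max a := by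
  apply le_antisymm
  · rcases PySem.List.foldl_max_mem xs a with h1 | h1
    · rw [h1]; exact (PySem.List.le_foldl_max ys a).1
    · exact (PySem.List.le_foldl_max ys a).2 _ ((h _).1 h1)
  · rcases PySem.List.foldl_max_mem ys a with h1 | h1
    · rw [h1]; exact (PySem.List.le_foldl_max xs a).1
    · exact (PySem.List.le_foldl_max xs a).2 _ ((h _).2 h1)

theorem set_map_range (T j : Nat) (f : Nat → Int) (v : Int) (hj : j < T) :
    ((List.range T).map f).set j v = (List.range T).map (fun i => if i = j then v else f i) := by
  apply List.ext_getElem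
  · simp
  · intro i h1 h2
    simp only [List.getElem_set, List.getElem_map, List.getElem_range]
    simp only [List.length_set, List.length_map, List.length_range] at h1
    by_cases hi : i = j <;> simp [hi]
    exact fun h => absurd h.symm hi

theorem award_A (stats : List (String × Int × Int × Int)) (cond : String → Prop)
    [DecidablePred cond] (t : Nat) :
    ∀ pts : PySem.Dict String (List Int), (∀ e ∈ stats, e.1 ∈ pts.keys) →
      ((stats.foldl (fun pts e => if cond e.1 then
          pts.modify e.1 [] (fun l => PySem.List.pySetD l (t : Int) 1) else pts) pts).keys = pts.keys
      ∧ ∀ n l, pts.get? n = some l →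
        (stats.foldl (fun pts e => if cond e.1 then
            pts.modify e.1 [] (fun l => PySem.List.pySetD l (t : Int) 1) else pts) pts).get? n =
          some (if n ∈ stats.map (·.1) ∧ cond n then l.set t 1 else l)) := by
  induction stats with
  | nil => intro pts h; exact ⟨rfl, fun n l hl => by simpa using hl⟩
  | cons e tl ih =>
    intro pts h
    simp only [List.foldl_cons]
    have hkeys1 : (if cond e.1 then
        pts.modify e.1 [] (fun l => PySem.List.pySetD l (t : Int) 1) else pts).keys = pts.keys := by
      split
      · rw [PySem.Dict.keys_modify, PySem.Dict.keys_insert_of_contains]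
        rw [PySem.Dict.contains_iff_mem_keys]
        exact h e (by simp)
      · rfl
    have hmem : ∀ e' ∈ tl, e'.1 ∈ (if cond e.1 then
        pts.modify e.1 [] (fun l => PySem.List.pySetD l (t : Int) 1) else pts).keys := by
      intro e' he'; rw [hkeys1]; exact h e' (by simp [he'])
    obtain ⟨ihk, ihg⟩ := ih _ hmem
    refine ⟨by rw [ihk, hkeys1], ?_⟩
    intro n l hl
    by_cases hen : e.1 = n
    · by_cases hc : cond e.1
      · have hstep : (if cond e.1 then
            pts.modify e.1 [] (fun l => PySem.List.pySetD l (t : Int) 1) else pts).get? n =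
            some (l.set t 1) := by
          rw [if_pos hc]
          show (pts.insert e.1 _).get? n = _
          rw [PySem.Dict.get?_insert, if_pos hen.symm, hen]
          beta_reduce
          rw [show pts.getD n [] = l from PySem.Dict.getD_of_get?_eq_some _ _ hl, PySem.List.pySetD_natCast]
        rw [ihg n _ hstep]
        have hcn : cond n := hen ▸ hc
        have hnm : n ∈ (e :: tl).map (·.1) := by simp [← hen]
        have hrhs : (if n ∈ (e :: tl).map (·.1) ∧ cond n then l.set t 1 else l) = l.set t 1 :=
          if_pos ⟨hnm, hcn⟩
        rw [hrhs]
        split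
        · rw [List.set_set]
        · rfl
      · have hstep : (if cond e.1 then
            pts.modify e.1 [] (fun l => PySem.List.pySetD l (t : Int) 1) else pts).get? n =
            some l := by rw [if_neg hc]; exact hl
        rw [ihg n _ hstep]
        have hcn : ¬ cond n := fun hcn => hc (hen ▸ hcn)
        rw [if_neg (fun hx => hcn hx.2), if_neg (fun hx => hcn hx.2)]
    · have hstep : (if cond e.1 then
          pts.modify e.1 [] (fun l => PySem.List.pySetD l (t : Int) 1) else pts).get? n =
          some l := by
        split
        · show (pts.insert e.1 _).get? n = _
          rw [PySem.Dict.get?_insert, if_neg (fun hx => hen hx.symm)]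
          exact hl
        · exact hl
      rw [ihg n _ hstep]
      have : (n ∈ (e :: tl).map (·.1) ∧ cond n) ↔ (n ∈ tl.map (·.1) ∧ cond n) := by
        simp only [List.map_cons, List.mem_cons]
        constructor
        · rintro ⟨h1 | h1, h2⟩
          · exact absurd h1.symm hen
          · exact ⟨h1, h2⟩
        · rintro ⟨h1, h2⟩; exact ⟨Or.inr h1, h2⟩
      rw [if_congr this rfl rfl]

theorem award_B (ps : List (String × Int)) (best : Int) :
    ∀ pts : PySem.Dict String Int, (ps.map (·.1)).Nodup →
      (∀ p ∈ ps, p.1 ∈ pts.keys) →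
      ((ps.foldl (fun pts p => if p.2 = best then pts.modify p.1 0 (· + 1) else pts) pts).keys = pts.keys
      ∧ ∀ n c, pts.get? n = some c →
        (ps.foldl (fun pts p => if p.2 = best then pts.modify p.1 0 (· + 1) else pts) pts).get? n =
          some (if ∃ p ∈ ps, p.1 = n ∧ p.2 = best then c + 1 else c)) := by
  induction ps with
  | nil => intro pts _ _; exact ⟨rfl, fun n c hc => by simpa using hc⟩
  | cons p tl ih =>
    intro pts hnd h
    simp only [List.foldl_cons]
    have hkeys1 : (if p.2 = best then pts.modify p.1 0 (· + 1) else pts).keys = pts.keys := by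
      split
      · rw [PySem.Dict.keys_modify, PySem.Dict.keys_insert_of_contains]
        rw [PySem.Dict.contains_iff_mem_keys]
        exact h p (by simp)
      · rfl
    have hnd' : (tl.map (·.1)).Nodup := by simp at hnd; exact hnd.2
    have hmem : ∀ p' ∈ tl, p'.1 ∈ (if p.2 = best then pts.modify p.1 0 (· + 1) else pts).keys := by
      intro p' hp'; rw [hkeys1]; exact h p' (by simp [hp'])
    obtain ⟨ihk, ihg⟩ := ih _ hnd' hmem
    refine ⟨by rw [ihk, hkeys1], ?_⟩
    intro n c hc
    by_cases hpn : p.1 = n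
    · have htl_no : ¬ ∃ p' ∈ tl, p'.1 = n ∧ p'.2 = best := by
        rintro ⟨p', hp', h1, _⟩
        simp only [List.map_cons, List.nodup_cons] at hnd
        exact hnd.1 (hpn ▸ h1 ▸ List.mem_map_of_mem hp')
      by_cases hb : p.2 = best
      · have hstep : (if p.2 = best then pts.modify p.1 0 (· + 1) else pts).get? n =
            some (c + 1) := by
          rw [if_pos hb]
          show (pts.insert p.1 _).get? n = _
          rw [PySem.Dict.get?_insert, if_pos hpn.symm, hpn]
          beta_reduce
          rw [show pts.getD n 0 = c from PySem.Dict.getD_of_get?_eq_some _ _ hc]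
        rw [ihg n _ hstep, if_neg htl_no, if_pos ⟨p, by simp, hpn, hb⟩]
      · have hstep : (if p.2 = best then pts.modify p.1 0 (· + 1) else pts).get? n =
            some c := by rw [if_neg hb]; exact hc
        rw [ihg n _ hstep, if_neg htl_no, if_neg]
        rintro ⟨p', hp', h1, h2⟩
        rcases List.mem_cons.mp hp' with rfl | hp'
        · exact hb h2
        · exact htl_no ⟨p', hp', h1, h2⟩
    · have hstep : (if p.2 = best then pts.modify p.1 0 (· + 1) else pts).get? n = some c := by
        split
        · show (pts.insert p.1 _).get? n = _
          rw [PySem.Dict.get?_insert, if_neg (fun hx => hpn hx.symm)]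
          exact hc
        · exact hc
      have hiff : (∃ p' ∈ p :: tl, p'.1 = n ∧ p'.2 = best) ↔
          (∃ p' ∈ tl, p'.1 = n ∧ p'.2 = best) := by
        constructor
        · rintro ⟨p', hp', h1, h2⟩
          rcases List.mem_cons.mp hp' with rfl | hp'
          · exact absurd h1 hpn
          · exact ⟨p', hp', h1, h2⟩
        · rintro ⟨p', hp', h1, h2⟩; exact ⟨p', by simp [hp'], h1, h2⟩
      rw [ihg n _ hstep, if_congr hiff rfl rfl]


-- Named A-side components and the unfolding of part_two into them --------

def distA (stats : List (String × Int × Int × Int)) (time : Int) : PySem.Dict String (List Int) :=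
  stats.foldl (fun d e =>
    (PySem.List.pyRange 0 time 1).foldl (fun d t =>
      if t = 0 then d.insert e.1 [PySem.List.pyGetD (statusOf e.2.1 e.2.2.1 e.2.2.2 time) t 0]
      else d.modify e.1 [] (fun l => l ++ [PySem.List.pyGetD l (-1) 0 +
        PySem.List.pyGetD (statusOf e.2.1 e.2.2.1 e.2.2.2 time) t 0])) d) PySem.Dict.empty

def ptsA0 (stats : List (String × Int × Int × Int)) (time : Int) : PySem.Dict String (List Int) :=
  stats.foldl (fun d e => d.insert e.1 (List.replicate time.toNat (0 : Int))) PySem.Dict.empty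

theorem partA_unfold (stats : List (String × Int × Int × Int)) (time : Int) :
    part_two stats time =
      ((PySem.List.pyRange 0 time 1).foldl (fun pts t =>
          stats.foldl (fun pts e =>
            if PySem.List.pyGetD ((distA stats time).getD e.1 []) t 0 =
                stats.foldl (fun m e => max (PySem.List.pyGetD ((distA stats time).getD e.1 []) t 0) m) 0
            then pts.modify e.1 [] (fun l => PySem.List.pySetD l t 1) else pts) pts)
        (ptsA0 stats time)).items.map (fun kv => (kv.1, kv.2.sum)) := by
  unfold part_two
  simp only []
  rw [PySem.List.foldl_prod_mk
    (f := fun (d : PySem.Dict String (List Int)) (e : String × Int × Int × Int) =>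
      (PySem.List.pyRange 0 time 1).foldl (fun d t =>
        if t = 0 then d.insert e.1 [PySem.List.pyGetD (statusOf e.2.1 e.2.2.1 e.2.2.2 time) t 0]
        else d.modify e.1 [] (fun l => l ++ [PySem.List.pyGetD l (-1) 0 +
          PySem.List.pyGetD (statusOf e.2.1 e.2.2.1 e.2.2.2 time) t 0])) d)
    (g := fun (d : PySem.Dict String (List Int)) (e : String × Int × Int × Int) =>
      d.insert e.1 (List.replicate time.toNat (0 : Int)))]
  rfl

def ptsB0 (stats : List (String × Int × Int × Int)) : PySem.Dict String Int :=
  (entOf stats).keys.foldl (fun d n => d.insert n (0 : Int)) PySem.Dict.empty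

theorem partB_unfold (stats : List (String × Int × Int × Int)) (time : Int) :
    part_two_alt stats time =
      ((PySem.List.pyRange 1 (time + 1) 1).foldl (fun (pts : PySem.Dict String Int) s =>
          ((entOf stats).items.map (fun kv => (kv.1, dist_at kv.2.1 kv.2.2.1 kv.2.2.2 s))).foldl
            (fun pts p => if p.2 = ((entOf stats).items.map
                (fun kv => (kv.1, dist_at kv.2.1 kv.2.2.1 kv.2.2.2 s))).foldl (fun b p => max b p.2) 0
              then pts.modify p.1 0 (· + 1) else pts) pts)
        (ptsB0 stats)).items := rfl


-- Common key/entry facts --------------------------------------------------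

theorem keysOf_nodup (stats : List (String × Int × Int × Int)) : (keysOf stats).Nodup :=
  PySem.Set.nodup_ofList _

theorem mem_keysOf (stats : List (String × Int × Int × Int)) (n : String) :
    n ∈ keysOf stats ↔ n ∈ stats.map (·.1) :=
  PySem.Set.mem_ofList _ n

theorem entOf_keys (stats : List (String × Int × Int × Int)) :
    (entOf stats).keys = keysOf stats := by
  unfold entOf
  rw [PySem.Dict.keys_foldl_insert_key stats (·.1) (fun _ e => e.2) PySem.Dict.empty]
  rfl

theorem entOf_items (stats : List (String × Int × Int × Int)) :
    (entOf stats).items = (keysOf stats).map (fun n => (n, valOf stats n)) := by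
  have hnd : (entOf stats).keys.Nodup := by rw [entOf_keys]; exact keysOf_nodup stats
  rw [PySem.Dict.items_eq_map_keys _ hnd (0, 0, 0), entOf_keys]
  rfl

theorem ptsB0_items (stats : List (String × Int × Int × Int)) :
    (ptsB0 stats).items = (keysOf stats).map (fun n => (n, (0 : Int))) := by
  unfold ptsB0
  rw [PySem.Dict.items_foldl_insert_fresh (entOf stats).keys (fun n => n) (fun _ => (0 : Int))
    PySem.Dict.empty (fun a _ => PySem.Dict.contains_empty a) (by simpa using
      (by rw [entOf_keys]; exact keysOf_nodup stats : (entOf stats).keys.Nodup))]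
  rw [entOf_keys]
  rfl

theorem ptsB0_keys (stats : List (String × Int × Int × Int)) :
    (ptsB0 stats).keys = keysOf stats := by
  show (ptsB0 stats).items.map (·.1) = keysOf stats
  rw [ptsB0_items, List.map_map]
  exact List.map_id _

theorem ptsB0_get (stats : List (String × Int × Int × Int)) (n : String) (hn : n ∈ keysOf stats) :
    (ptsB0 stats).get? n = some 0 := by
  apply PySem.Dict.get?_of_mem_items
  · rw [ptsB0_items]
    exact List.mem_map_of_mem hn
  · rw [ptsB0_keys]; exact keysOf_nodup stats


theorem items_of_char {ν : Type} (K : List String) (hnd : K.Nodup)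
    (pts : PySem.Dict String ν) (f : String → ν) (dflt : ν)
    (hk : pts.keys = K) (hg : ∀ n ∈ K, pts.get? n = some (f n)) :
    pts.items = K.map (fun n => (n, f n)) := by
  rw [PySem.Dict.items_eq_map_keys pts (by rw [hk]; exact hnd) dflt, hk]
  apply List.map_congr_left
  intro n hn
  rw [PySem.Dict.getD_of_get?_eq_some _ _ (hg n hn)]

theorem stepB (stats : List (String × Int × Int × Int)) (j : Nat)
    (pts : PySem.Dict String Int) (hkeys : pts.keys = keysOf stats) :
    (((entOf stats).items.map (fun kv => (kv.1, dist_at kv.2.1 kv.2.2.1 kv.2.2.2 (1 + (j : Int))))).foldl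
        (fun pts p => if p.2 = ((entOf stats).items.map
            (fun kv => (kv.1, dist_at kv.2.1 kv.2.2.1 kv.2.2.2 (1 + (j : Int))))).foldl (fun b p => max b p.2) 0
          then pts.modify p.1 0 (· + 1) else pts) pts).keys = keysOf stats
    ∧ ∀ n ∈ keysOf stats, ∀ c : Int, pts.get? n = some c →
      (((entOf stats).items.map (fun kv => (kv.1, dist_at kv.2.1 kv.2.2.1 kv.2.2.2 (1 + (j : Int))))).foldl
        (fun pts p => if p.2 = ((entOf stats).items.map
            (fun kv => (kv.1, dist_at kv.2.1 kv.2.2.1 kv.2.2.2 (1 + (j : Int))))).foldl (fun b p => max b p.2) 0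
          then pts.modify p.1 0 (· + 1) else pts) pts).get? n =
        some (c + if leadOf stats n j then 1 else 0) := by
  have hK := keysOf_nodup stats
  have hdists : ((entOf stats).items.map
      (fun kv => (kv.1, dist_at kv.2.1 kv.2.2.1 kv.2.2.2 (1 + (j : Int))))) =
      (keysOf stats).map (fun n => (n, dOf stats n (1 + (j : Int)))) := by
    rw [entOf_items, List.map_map]
    rfl
  have hbest : ((entOf stats).items.map
      (fun kv => (kv.1, dist_at kv.2.1 kv.2.2.1 kv.2.2.2 (1 + (j : Int))))).foldl
        (fun b p => max b p.2) 0 = maxOf stats (1 + (j : Int)) := by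
    rw [hdists]
    unfold maxOf
    rw [List.foldl_map, List.foldl_map]
  rw [hbest, hdists]
  have hfst : (((keysOf stats).map (fun n => (n, dOf stats n (1 + (j : Int))))).map (·.1)).Nodup := by
    rw [List.map_map,
       show ((fun (p : String × Int) => p.1) ∘ fun n => (n, dOf stats n (1 + (j : Int)))) = id from rfl,
       List.map_id]
    exact hK
  have hkeys' : ∀ p ∈ (keysOf stats).map (fun n => (n, dOf stats n (1 + (j : Int)))),
      p.1 ∈ pts.keys := by
    intro p hp
    rw [hkeys]
    obtain ⟨m, hm, rfl⟩ := List.mem_map.mp hp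
    exact hm
  obtain ⟨hak, hag⟩ := award_B ((keysOf stats).map (fun n => (n, dOf stats n (1 + (j : Int)))))
    (maxOf stats (1 + (j : Int))) pts hfst hkeys'
  refine ⟨by rw [hak, hkeys], ?_⟩
  intro n hn c hc
  rw [hag n _ hc]
  have hex : (∃ p ∈ (keysOf stats).map (fun n => (n, dOf stats n (1 + (j : Int)))),
      p.1 = n ∧ p.2 = maxOf stats (1 + (j : Int))) ↔ leadOf stats n j = true := by
    unfold leadOf
    rw [decide_eq_true_iff]
    constructor
    · rintro ⟨p, hp, h1, h2⟩
      obtain ⟨m, _, rfl⟩ := List.mem_map.mp hp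
      simp only at h1 h2
      subst h1
      rw [show (j : Int) + 1 = 1 + (j : Int) from by ring]
      exact h2
    · intro h
      refine ⟨(n, dOf stats n (1 + (j : Int))), List.mem_map_of_mem hn, rfl, ?_⟩
      rw [show (1 : Int) + (j : Int) = (j : Int) + 1 from by ring]
      exact h
  by_cases hl : leadOf stats n j = true
  · rw [if_pos (hex.mpr hl), if_pos hl]
  · rw [if_neg (fun hx => hl (hex.mp hx)), if_neg (fun hx => hl hx)]
    norm_num

-- B equals the reference --------------------------------------------------

theorem partB_eq_ref (stats : List (String × Int × Int × Int)) (time : Int) :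
    part_two_alt stats time = refOut stats time := by
  rw [partB_unfold]
  rw [PySem.List.pyRange_one 1 (time + 1), show time + 1 - 1 = time from by ring, List.foldl_map]
  have hK := keysOf_nodup stats
  have hinv : ∀ j : Nat,
      ((List.range j).foldl (fun (pts : PySem.Dict String Int) (k : Nat) =>
          ((entOf stats).items.map (fun kv => (kv.1, dist_at kv.2.1 kv.2.2.1 kv.2.2.2 (1 + (k : Int))))).foldl
            (fun pts p => if p.2 = ((entOf stats).items.map
                (fun kv => (kv.1, dist_at kv.2.1 kv.2.2.1 kv.2.2.2 (1 + (k : Int))))).foldl (fun b p => max b p.2) 0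
              then pts.modify p.1 0 (· + 1) else pts) pts) (ptsB0 stats)).keys = keysOf stats
      ∧ ∀ n ∈ keysOf stats,
        ((List.range j).foldl (fun (pts : PySem.Dict String Int) (k : Nat) =>
          ((entOf stats).items.map (fun kv => (kv.1, dist_at kv.2.1 kv.2.2.1 kv.2.2.2 (1 + (k : Int))))).foldl
            (fun pts p => if p.2 = ((entOf stats).items.map
                (fun kv => (kv.1, dist_at kv.2.1 kv.2.2.1 kv.2.2.2 (1 + (k : Int))))).foldl (fun b p => max b p.2) 0
              then pts.modify p.1 0 (· + 1) else pts) pts) (ptsB0 stats)).get? n =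
          some (((List.range j).countP (leadOf stats n) : Nat) : Int) := by
    intro j
    induction j with
    | zero =>
      refine ⟨ptsB0_keys stats, ?_⟩
      intro n hn
      simpa using ptsB0_get stats n hn
    | succ j ih =>
      obtain ⟨ihk, ihg⟩ := ih
      rw [List.range_succ, List.foldl_append, List.foldl_cons, List.foldl_nil]
      obtain ⟨sk, sg⟩ := stepB stats j _ ihk
      refine ⟨sk, ?_⟩
      intro n hn
      rw [sg n hn _ (ihg n hn)]
      rw [List.countP_append]
      simp only [List.countP_cons, List.countP_nil]
      by_cases hl : leadOf stats n j = true
      all_goals simp [hl] <;> (try push_cast) <;> (try ring)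
  obtain ⟨hk, hg⟩ := hinv time.toNat
  unfold refOut
  exact items_of_char (keysOf stats) hK _
    (fun n => ((List.range time.toNat).countP (leadOf stats n) : Int)) 0 hk hg


-- A-side dictionary characterisations ------------------------------------

theorem entOf_get (stats : List (String × Int × Int × Int)) (n : String) :
    (entOf stats).get? n = ((stats.reverse.find? (fun e => e.1 == n)).map (·.2)).or none := by
  unfold entOf
  rw [lastWins stats _ (·.2) n ?_ PySem.Dict.empty]
  · rw [PySem.Dict.get?_empty]
  · intro d e _
    rw [PySem.Dict.get?_insert]
    by_cases he : e.1 = n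
    · rw [if_pos he.symm, if_pos he]
    · rw [if_neg (fun hx => he hx.symm), if_neg he]

theorem find_spec (stats : List (String × Int × Int × Int)) (n : String)
    (hn : n ∈ keysOf stats) :
    ∃ e, stats.reverse.find? (fun e => e.1 == n) = some e ∧ e ∈ stats ∧ e.1 = n ∧
      e.2 = valOf stats n := by
  have hn' : n ∈ stats.map (·.1) := (mem_keysOf stats n).mp hn
  obtain ⟨e, he, hne⟩ := List.mem_map.mp hn'
  have hsome : (stats.reverse.find? (fun e => e.1 == n)).isSome := by
    rw [List.find?_isSome]
    exact ⟨e, List.mem_reverse.mpr he, by simp [hne]⟩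
  obtain ⟨e0, hfind⟩ := Option.isSome_iff_exists.mp hsome
  have he0n : e0.1 = n := by
    have := List.find?_some hfind
    simpa using this
  have he0mem : e0 ∈ stats := List.mem_reverse.mp (List.mem_of_find?_eq_some hfind)
  refine ⟨e0, hfind, he0mem, he0n, ?_⟩
  have hget : (entOf stats).get? n = some e0.2 := by
    rw [entOf_get, hfind]
    rfl
  unfold valOf
  rw [PySem.Dict.getD_of_get?_eq_some _ _ hget]

theorem ptsA0_keys (stats : List (String × Int × Int × Int)) (time : Int) :
    (ptsA0 stats time).keys = keysOf stats := by
  unfold ptsA0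
  rw [PySem.Dict.keys_foldl_insert_key stats (·.1)
    (fun _ _ => List.replicate time.toNat (0 : Int)) PySem.Dict.empty]
  rfl

theorem ptsA0_get (stats : List (String × Int × Int × Int)) (time : Int) (n : String)
    (hn : n ∈ keysOf stats) :
    (ptsA0 stats time).get? n = some (List.replicate time.toNat (0 : Int)) := by
  obtain ⟨e0, hfind, _, _, _⟩ := find_spec stats n hn
  unfold ptsA0
  rw [lastWins stats _ (fun _ => List.replicate time.toNat (0 : Int)) n ?_ PySem.Dict.empty, hfind]
  · rfl
  · intro d e _
    rw [PySem.Dict.get?_insert]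
    by_cases he : e.1 = n
    · rw [if_pos he.symm, if_pos he]
    · rw [if_neg (fun hx => he hx.symm), if_neg he]

theorem distA_get (stats : List (String × Int × Int × Int)) (time : Int)
    (hpre : Pre_part_two stats time) (ht : 0 < time) (n : String) (hn : n ∈ keysOf stats) :
    (distA stats time).get? n =
      some ((List.range time.toNat).map (fun i : Nat => dOf stats n ((i : Int) + 1))) := by
  obtain ⟨e0, hfind, he0mem, he0n, he0v⟩ := find_spec stats n hn
  unfold distA
  rw [lastWins stats _ (fun e => cumA e time) n ?_ PySem.Dict.empty, hfind]
  · show some (cumA e0 time) = _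
    unfold cumA
    rw [he0v]
    rfl
  · intro d e he
    obtain ⟨hp0, hp1⟩ := hpre e he
    obtain ⟨htt, hrt⟩ := hp1 ht
    rw [cum_fold_get e time htt hrt (by omega) ht d n]
    by_cases hx : e.1 = n
    · rw [if_pos hx.symm, if_pos hx]
    · rw [if_neg (fun hy => hx hy.symm), if_neg hx]

-- per-second values and maxima of A --------------------------------------

theorem dvA (stats : List (String × Int × Int × Int)) (time : Int)
    (hpre : Pre_part_two stats time) (ht : 0 < time) (n : String) (hn : n ∈ keysOf stats)
    (j : Nat) (hj : j < time.toNat) :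
    PySem.List.pyGetD ((distA stats time).getD n []) ((j : Nat) : Int) 0 =
      dOf stats n ((j : Int) + 1) := by
  rw [PySem.Dict.getD_of_get?_eq_some _ _ (distA_get stats time hpre ht n hn),
      PySem.List.pyGetD_natCast, PySem.List.getD_map_range _ _ _ _ hj]

theorem maxA (stats : List (String × Int × Int × Int)) (time : Int)
    (hpre : Pre_part_two stats time) (ht : 0 < time) (j : Nat) (hj : j < time.toNat) :
    stats.foldl (fun m e =>
        max (PySem.List.pyGetD ((distA stats time).getD e.1 []) ((j : Nat) : Int) 0) m) 0 =
      maxOf stats ((j : Int) + 1) := by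
  have hcg := PySem.List.foldl_congr_mem (l := stats) (init := (0 : Int))
    (f := fun m e => max (PySem.List.pyGetD ((distA stats time).getD e.1 []) ((j : Nat) : Int) 0) m)
    (g := fun m e => max m (dOf stats e.1 ((j : Int) + 1)))
    (fun m e he => by
      beta_reduce
      rw [dvA stats time hpre ht e.1 ((mem_keysOf stats e.1).mpr (List.mem_map_of_mem he)) j hj,
          max_comm])
  rw [hcg, show List.foldl (fun m e => max m (dOf stats e.1 ((j : Int) + 1))) 0 stats =
    (stats.map (fun e => dOf stats e.1 ((j : Int) + 1))).foldl max 0 from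
      (List.foldl_map).symm]
  unfold maxOf
  apply foldl_max_eq_of_mem_iff
  intro z
  simp only [List.mem_map]
  constructor
  · rintro ⟨e, he, rfl⟩
    exact ⟨e.1, (mem_keysOf stats e.1).mpr (List.mem_map_of_mem he), rfl⟩
  · rintro ⟨m, hm, rfl⟩
    obtain ⟨e, he, rfl⟩ := List.mem_map.mp ((mem_keysOf stats m).mp hm)
    exact ⟨e, he, rfl⟩

-- the indicator lists of A ------------------------------------------------

def LA (stats : List (String × Int × Int × Int)) (time : Int) (n : String) (j : Nat) : List Int :=
  (List.range time.toNat).map (fun i => if i < j ∧ leadOf stats n i = true then (1 : Int) else 0)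

theorem LA_zero (stats : List (String × Int × Int × Int)) (time : Int) (n : String) :
    LA stats time n 0 = List.replicate time.toNat (0 : Int) := by
  unfold LA
  rw [List.eq_replicate_iff]
  refine ⟨by simp, ?_⟩
  intro b hb
  obtain ⟨i, _, rfl⟩ := List.mem_map.mp hb
  simp

theorem LA_succ_set (stats : List (String × Int × Int × Int)) (time : Int) (n : String)
    (j : Nat) (hj : j < time.toNat) (hl : leadOf stats n j = true) :
    (LA stats time n j).set j 1 = LA stats time n (j + 1) := by
  unfold LA
  rw [set_map_range _ _ _ _ hj]
  apply List.map_congr_left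
  intro i hi
  by_cases hij : i = j
  · subst hij
    rw [if_pos rfl, if_pos ⟨by omega, hl⟩]
  · rw [if_neg hij]
    by_cases hcond : i < j ∧ leadOf stats n i = true
    · rw [if_pos hcond, if_pos ⟨by omega, hcond.2⟩]
    · rw [if_neg hcond, if_neg (fun hx => hcond ⟨by omega, hx.2⟩)]

theorem LA_succ_id (stats : List (String × Int × Int × Int)) (time : Int) (n : String)
    (j : Nat) (hl : ¬ leadOf stats n j = true) :
    LA stats time n j = LA stats time n (j + 1) := by
  unfold LA
  apply List.map_congr_left
  intro i hi
  by_cases hij : i = j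
  · subst hij
    rw [if_neg (fun hx => by omega), if_neg (fun hx => hl hx.2)]
  · by_cases hcond : i < j ∧ leadOf stats n i = true
    · rw [if_pos hcond, if_pos ⟨by omega, hcond.2⟩]
    · rw [if_neg hcond, if_neg]
      rintro ⟨h1, h2⟩
      exact hcond ⟨by omega, h2⟩

theorem LA_sum (stats : List (String × Int × Int × Int)) (time : Int) (n : String) :
    (LA stats time n time.toNat).sum =
      (((List.range time.toNat).countP (leadOf stats n) : Nat) : Int) := by
  unfold LA
  rw [show ((List.range time.toNat).map
      (fun i => if i < time.toNat ∧ leadOf stats n i = true then (1 : Int) else 0)) =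
      ((List.range time.toNat).map (fun i => if leadOf stats n i then (1 : Int) else 0)) from
    List.map_congr_left (fun i hi => by
      have : i < time.toNat := List.mem_range.mp hi
      by_cases hl : leadOf stats n i = true
      · rw [if_pos ⟨this, hl⟩, if_pos hl]
      · rw [if_neg (fun hx => hl hx.2), if_neg hl])]
  exact PySem.List.sum_map_ite_one_zero (leadOf stats n) (List.range time.toNat)

-- one second of A ---------------------------------------------------------

theorem stepA (stats : List (String × Int × Int × Int)) (time : Int)
    (hpre : Pre_part_two stats time) (ht : 0 < time) (j : Nat) (hj : j < time.toNat)
    (pts : PySem.Dict String (List Int)) (hkeys : pts.keys = keysOf stats) :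
    (stats.foldl (fun pts e =>
        if PySem.List.pyGetD ((distA stats time).getD e.1 []) ((j : Nat) : Int) 0 =
            stats.foldl (fun m e =>
              max (PySem.List.pyGetD ((distA stats time).getD e.1 []) ((j : Nat) : Int) 0) m) 0
        then pts.modify e.1 [] (fun l => PySem.List.pySetD l ((j : Nat) : Int) 1) else pts) pts).keys =
      keysOf stats
    ∧ ∀ n ∈ keysOf stats, ∀ l, pts.get? n = some l →
      (stats.foldl (fun pts e =>
        if PySem.List.pyGetD ((distA stats time).getD e.1 []) ((j : Nat) : Int) 0 =
            stats.foldl (fun m e =>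
              max (PySem.List.pyGetD ((distA stats time).getD e.1 []) ((j : Nat) : Int) 0) m) 0
        then pts.modify e.1 [] (fun l => PySem.List.pySetD l ((j : Nat) : Int) 1) else pts) pts).get? n =
        some (if leadOf stats n j then l.set j 1 else l) := by
  have hmem : ∀ e ∈ stats, e.1 ∈ pts.keys := by
    intro e he
    rw [hkeys]
    exact (mem_keysOf stats e.1).mpr (List.mem_map_of_mem he)
  obtain ⟨hak, hag⟩ := award_A stats
    (fun m => PySem.List.pyGetD ((distA stats time).getD m []) ((j : Nat) : Int) 0 =
      stats.foldl (fun mx e =>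
        max (PySem.List.pyGetD ((distA stats time).getD e.1 []) ((j : Nat) : Int) 0) mx) 0)
    j pts hmem
  refine ⟨by rw [hak, hkeys], ?_⟩
  intro n hn l hl
  rw [hag n l hl]
  have hcond : (n ∈ stats.map (·.1) ∧
      PySem.List.pyGetD ((distA stats time).getD n []) ((j : Nat) : Int) 0 =
        stats.foldl (fun mx e =>
          max (PySem.List.pyGetD ((distA stats time).getD e.1 []) ((j : Nat) : Int) 0) mx) 0) ↔
      leadOf stats n j = true := by
    unfold leadOf
    rw [decide_eq_true_iff, dvA stats time hpre ht n hn j hj, maxA stats time hpre ht j hj]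
    constructor
    · exact fun h => h.2
    · exact fun h => ⟨(mem_keysOf stats n).mp hn, h⟩
  rw [if_congr hcond rfl rfl]

-- A equals the reference --------------------------------------------------

theorem partA_eq_ref (stats : List (String × Int × Int × Int)) (time : Int)
    (hpre : Pre_part_two stats time) :
    part_two stats time = refOut stats time := by
  rw [partA_unfold]
  have hK := keysOf_nodup stats
  by_cases ht : 0 < time
  · rw [show time = ((time.toNat : Nat) : Int) from (Int.toNat_of_nonneg (by omega)).symm,
        PySem.List.pyRange_zero_natCast, List.foldl_map]
    rw [Int.toNat_of_nonneg (by omega : (0:Int) ≤ time)]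
    have hinv : ∀ j : Nat, j ≤ time.toNat →
        ((List.range j).foldl (fun pts (k : Nat) =>
          stats.foldl (fun pts e =>
            if PySem.List.pyGetD ((distA stats time).getD e.1 []) ((k : Nat) : Int) 0 =
                stats.foldl (fun m e =>
                  max (PySem.List.pyGetD ((distA stats time).getD e.1 []) ((k : Nat) : Int) 0) m) 0
            then pts.modify e.1 [] (fun l => PySem.List.pySetD l ((k : Nat) : Int) 1) else pts) pts)
          (ptsA0 stats time)).keys = keysOf stats
        ∧ ∀ n ∈ keysOf stats,
          ((List.range j).foldl (fun pts (k : Nat) =>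
            stats.foldl (fun pts e =>
              if PySem.List.pyGetD ((distA stats time).getD e.1 []) ((k : Nat) : Int) 0 =
                  stats.foldl (fun m e =>
                    max (PySem.List.pyGetD ((distA stats time).getD e.1 []) ((k : Nat) : Int) 0) m) 0
              then pts.modify e.1 [] (fun l => PySem.List.pySetD l ((k : Nat) : Int) 1) else pts) pts)
            (ptsA0 stats time)).get? n = some (LA stats time n j) := by
      intro j
      induction j with
      | zero =>
        intro _
        refine ⟨ptsA0_keys stats time, ?_⟩
        intro n hn
        rw [List.range_zero, List.foldl_nil, ptsA0_get stats time n hn, LA_zero]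
      | succ j ih =>
        intro hle
        obtain ⟨ihk, ihg⟩ := ih (by omega)
        rw [List.range_succ, List.foldl_append, List.foldl_cons, List.foldl_nil]
        obtain ⟨sk, sg⟩ := stepA stats time hpre ht j (by omega) _ ihk
        refine ⟨sk, ?_⟩
        intro n hn
        rw [sg n hn _ (ihg n hn)]
        by_cases hl : leadOf stats n j = true
        · rw [if_pos hl, LA_succ_set stats time n j (by omega) hl]
        · rw [if_neg hl, ← LA_succ_id stats time n j hl]
    obtain ⟨hk, hg⟩ := hinv time.toNat le_rfl
    rw [items_of_char (keysOf stats) hK _ (fun n => LA stats time n time.toNat) [] hk hg]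
    unfold refOut
    rw [List.map_map]
    apply List.map_congr_left
    intro n hn
    show (n, (LA stats time n time.toNat).sum) = _
    rw [LA_sum]
  · rw [PySem.List.pyRange_one_eq_nil (by omega), List.foldl_nil]
    have hT : time.toNat = 0 := by omega
    have hg : ∀ n ∈ keysOf stats, (ptsA0 stats time).get? n = some ([] : List Int) := by
      intro n hn
      rw [ptsA0_get stats time n hn, hT]
      rfl
    rw [items_of_char (keysOf stats) hK _ (fun _ => ([] : List Int)) []
      (ptsA0_keys stats time) hg]
    unfold refOut
    rw [List.map_map]
    apply List.map_congr_left
    intro n hn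
    show (n, (0 : Int)) = _
    rw [hT]
    rfl

-- ===== main proof =====

theorem part_two_spec' (stats : List (String × Int × Int × Int)) (time : Int)
    (hpre : Pre_part_two stats time) :
    part_two stats time = part_two_alt stats time := by
  rw [partA_eq_ref stats time hpre, partB_eq_ref stats time]

-- ===== VERDICT (by name: the statement is the Claim_ definition above) =====
theorem part_two_spec : Claim_equal_part_two := by
  intro stats time _ hpre
  unfold Spec_part_two
  exact part_two_spec' stats time hpre
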